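-- pv_equiv track=rewrite | github.com/JojoN0tFound/rubik | optimization.py | _removeFourMovement
-- ===== SOURCE A (Python) =====
-- def _removeFourMovement(tmp):
-- 	newLst = []
-- 	i = 0
-- 	restart = False
-- 	while i < len(tmp):
-- 		if(i + 4 <= len(tmp) and tmp[i] == tmp[i + 1] == tmp[i + 2] == tmp [i + 3]):
-- 			i += 4
-- 			restart = True
-- 		else:
-- 			newLst.append(tmp[i])
-- 			i += 1
-- 	return _removeFourMovement(newLst) if restart else newLst
-- ===== SOURCE B (Python) =====
-- def _removeFourMovement(tmp):
--     stack = []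
--     for m in tmp:
--         if stack and stack[-1][0] == m:
--             if stack[-1][1] == 3:
--                 stack.pop()
--             else:
--                 stack[-1] = (m, stack[-1][1] + 1)
--         else:
--             stack.append((m, 1))
--     out = []
--     for v, c in stack:
--         out.extend([v] * c)
--     return out
-- ===== Notes on version B (the rewrite author's own statement) =====
-- stated objective: alternative
-- what changed: Replaces the restart-the-whole-scan-after-any-removal loop with a single left-to-right pass over a stack of (value,count) pairs that pops a group when its count reaches 4 and lets the revealed neighbour keep absorbing, so no repeated passes are needed.
import Mathlib
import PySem

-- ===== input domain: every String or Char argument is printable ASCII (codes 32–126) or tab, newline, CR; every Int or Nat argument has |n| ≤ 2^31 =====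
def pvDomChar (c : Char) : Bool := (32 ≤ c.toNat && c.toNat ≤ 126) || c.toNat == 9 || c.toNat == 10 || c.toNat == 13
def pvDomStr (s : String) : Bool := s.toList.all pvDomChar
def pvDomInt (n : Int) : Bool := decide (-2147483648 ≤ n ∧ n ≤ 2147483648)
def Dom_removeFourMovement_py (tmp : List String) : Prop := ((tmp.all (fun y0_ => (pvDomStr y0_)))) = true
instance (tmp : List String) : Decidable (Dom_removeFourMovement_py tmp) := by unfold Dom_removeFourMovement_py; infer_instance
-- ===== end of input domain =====

-- B replaces A's restart-after-removal repeated scans by a single stack pass of (value,count) pairs (alternative algorithm, one pass instead of repeated passes).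


-- ===== PORT A =====
-- the while-loop of A: index i, accumulator newLst, flag restart; tmp[i] is in range whenever read
-- (guarded by i < len / i+4 <= len), so getD's default is never used. The loop advances i every
-- iteration, so fuel = tmp.length - i iterations always suffice (fuel is only a totality guard).
def pvLoopAF (tmp : List String) : Nat → Nat → List String → Bool → List String × Bool
  | 0, _, newLst, restart => (newLst, restart)
  | fuel+1, i, newLst, restart =>
    if i < tmp.length then
      if i + 4 ≤ tmp.length ∧ tmp.getD i "" = tmp.getD (i+1) "" ∧ tmp.getD (i+1) "" = tmp.getD (i+2) "" ∧ tmp.getD (i+2) "" = tmp.getD (i+3) "" then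
        pvLoopAF tmp fuel (i+4) newLst true
      else
        pvLoopAF tmp fuel (i+1) (newLst ++ [tmp.getD i ""]) restart
    else (newLst, restart)

def pvLoopA (tmp : List String) (i : Nat) (newLst : List String) (restart : Bool) : List String × Bool :=
  pvLoopAF tmp (tmp.length - i) i newLst restart

-- A's tail recursion on the rebuilt list; every restart round removes at least 4 elements, so
-- tmp.length + 1 rounds always suffice (fuel is only a totality guard)
def pvAGo : Nat → List String → List String
  | 0, tmp => tmp
  | f+1, tmp =>
    let p := pvLoopA tmp 0 [] false
    if p.2 then pvAGo f p.1 else p.1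

def removeFourMovement_py (tmp : List String) : List String :=
  pvAGo (tmp.length + 1) tmp

-- ===== PORT B =====
-- one step of Source B's for-loop; the Lean list head is the Python stack's last element
def pvStepB (st : List (String × Nat)) (m : String) : List (String × Nat) :=
  match st with
  | (b, c) :: rest =>
      if b = m then (if c = 3 then rest else (m, c + 1) :: rest)
      else (m, 1) :: (b, c) :: rest
  | [] => [(m, 1)]

-- Source B's final loop: emit each stack entry's value c times, in Python stack order (= reversed Lean list)
def pvRender (st : List (String × Nat)) : List String :=
  st.reverse.flatMap (fun p => List.replicate p.2 p.1)

def removeFourMovement_py_alt (tmp : List String) : List String :=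
  pvRender (tmp.foldl pvStepB [])

-- ===== PRECONDITION & SPEC =====
def Spec_removeFourMovement_py (tmp : List String) (out : List String) : Prop := out = removeFourMovement_py_alt tmp
instance (tmp : List String) (out : List String) : Decidable (Spec_removeFourMovement_py tmp out) := by unfold Spec_removeFourMovement_py; infer_instance

-- ===== CLAIM (what is proved, stated in full; the proofs are below) =====
def Claim_equal_removeFourMovement_py : Prop := ∀ (tmp : List String), Dom_removeFourMovement_py tmp → Spec_removeFourMovement_py tmp (removeFourMovement_py tmp)

-- ===== LEMMAS AND PROOFS =====

-- A's single pass, written as a recursion on the list (related to pvLoopA below)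
def pvPass : List String → List String × Bool
  | a :: b :: c :: d :: rest =>
      if a = b ∧ b = c ∧ c = d then ((pvPass rest).1, true)
      else
        let p := pvPass (b :: c :: d :: rest)
        (a :: p.1, p.2)
  | l => (l, false)
termination_by l => l.length

-- the loop at index i computes acc ++ pass of the remaining suffix (whenever the fuel covers the suffix)
theorem pvLoopAF_eq_pass (tmp : List String) (fuel : Nat) :
    ∀ (i : Nat) (acc : List String) (r : Bool), tmp.length - i ≤ fuel →
      pvLoopAF tmp fuel i acc r = (acc ++ (pvPass (tmp.drop i)).1, r || (pvPass (tmp.drop i)).2) := by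
  induction fuel with
  | zero =>
      intro i acc r hf
      have hge : tmp.length ≤ i := by omega
      have : tmp.drop i = [] := List.drop_eq_nil_of_le hge
      simp [pvLoopAF, this, pvPass]
  | succ fuel IH =>
      intro i acc r hf
      rw [pvLoopAF]
      by_cases hi : i < tmp.length
      · rw [if_pos hi]
        by_cases hcond : i + 4 ≤ tmp.length ∧ tmp.getD i "" = tmp.getD (i+1) "" ∧ tmp.getD (i+1) "" = tmp.getD (i+2) "" ∧ tmp.getD (i+2) "" = tmp.getD (i+3) ""
        · rw [if_pos hcond]
          have ih := IH (i+4) acc true (by omega)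
          obtain ⟨h4, e1, e2, e3⟩ := hcond
          have h0 : i < tmp.length := by omega
          have h1 : i + 1 < tmp.length := by omega
          have h2 : i + 2 < tmp.length := by omega
          have h3 : i + 3 < tmp.length := by omega
          have hd : tmp.drop i = tmp[i] :: tmp[i+1] :: tmp[i+2] :: tmp[i+3] :: tmp.drop (i+4) := by
            rw [List.drop_eq_getElem_cons h0, List.drop_eq_getElem_cons h1,
                List.drop_eq_getElem_cons h2, List.drop_eq_getElem_cons h3]
          simp only [List.getD_eq_getElem _ _ h0, List.getD_eq_getElem _ _ h1,
            List.getD_eq_getElem _ _ h2, List.getD_eq_getElem _ _ h3] at e1 e2 e3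
          rw [ih, hd]
          rw [pvPass]
          simp [e1, e2, e3]
        · rw [if_neg hcond]
          have ih := IH (i+1) (acc ++ [tmp.getD i ""]) r (by omega)
          have h0 : i < tmp.length := by omega
          have hd : tmp.drop i = tmp[i] :: tmp.drop (i+1) := List.drop_eq_getElem_cons h0
          rw [ih, hd]
          by_cases h4 : i + 4 ≤ tmp.length
          · have h1 : i + 1 < tmp.length := by omega
            have h2 : i + 2 < tmp.length := by omega
            have h3 : i + 3 < tmp.length := by omega
            have hd' : tmp.drop (i+1) = tmp[i+1] :: tmp[i+2] :: tmp[i+3] :: tmp.drop (i+4) := by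
              rw [List.drop_eq_getElem_cons h1, List.drop_eq_getElem_cons h2, List.drop_eq_getElem_cons h3]
            simp only [List.getD_eq_getElem _ _ h0, List.getD_eq_getElem _ _ h1,
              List.getD_eq_getElem _ _ h2, List.getD_eq_getElem _ _ h3] at hcond
            push_neg at hcond
            rw [hd']
            rw [pvPass]
            have hne : ¬ (tmp[i] = tmp[i+1] ∧ tmp[i+1] = tmp[i+2] ∧ tmp[i+2] = tmp[i+3]) := by
              intro ⟨a1, a2, a3⟩; exact (hcond h4 a1 a2) a3
            simp [hne, List.getElem?_eq_getElem h0]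
          · -- fewer than 4 elements remain: pass of the suffix is the suffix itself
            have hlen : (tmp.drop (i+1)).length < 3 := by simp; omega
            have hps : pvPass (tmp.drop (i+1)) = (tmp.drop (i+1), false) := by
              rcases e : tmp.drop (i+1) with _ | ⟨x, _ | ⟨y, _ | ⟨z, _ | _⟩⟩⟩ <;>
                simp_all [pvPass] <;> omega
            have hps2 : pvPass (tmp[i] :: tmp.drop (i+1)) = (tmp[i] :: tmp.drop (i+1), false) := by
              rcases e : tmp.drop (i+1) with _ | ⟨x, _ | ⟨y, _ | ⟨z, _ | _⟩⟩⟩ <;>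
                simp_all [pvPass] <;> omega
            rw [hps, hps2]
            simp [List.getD_eq_getElem _ _ h0]
            rw [hd, List.getElem?_eq_getElem h0]
            simp
      · rw [if_neg hi]
        have : tmp.drop i = [] := List.drop_eq_nil_of_le (by omega)
        simp [this, pvPass]

theorem pvLoopA_eq_pass (tmp : List String) (i : Nat) (acc : List String) (r : Bool) :
    pvLoopA tmp i acc r = (acc ++ (pvPass (tmp.drop i)).1, r || (pvPass (tmp.drop i)).2) :=
  pvLoopAF_eq_pass tmp (tmp.length - i) i acc r (Nat.le_refl _)

-- adjacent stack entries carry distinct values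
def pvAdj : List (String × Nat) → Prop
  | p :: q :: rest => p.1 ≠ q.1 ∧ pvAdj (q :: rest)
  | _ => True

-- stack invariant: every count is in 1..3 and adjacent entries carry distinct values
def pvInv (st : List (String × Nat)) : Prop :=
  (∀ p ∈ st, 1 ≤ p.2 ∧ p.2 ≤ 3) ∧ pvAdj st

theorem pvInv_nil : pvInv [] := ⟨by simp, trivial⟩

theorem pvInv_step (st : List (String × Nat)) (m : String) (h : pvInv st) : pvInv (pvStepB st m) := by
  obtain ⟨hc, hch⟩ := h
  cases st with
  | nil => exact ⟨by simp [pvStepB], by simp [pvStepB, pvAdj]⟩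
  | cons p rest =>
    obtain ⟨b, c⟩ := p
    by_cases hb : b = m
    · by_cases h3 : c = 3
      · simp only [pvStepB, if_pos hb, if_pos h3]
        refine ⟨fun q hq => hc q (List.mem_cons_of_mem _ hq), ?_⟩
        cases rest with
        | nil => trivial
        | cons q rs => exact hch.2
      · simp only [pvStepB, if_pos hb, if_neg h3]
        constructor
        · intro q hq
          rcases List.mem_cons.1 hq with e | hq'
          · subst e; have := hc (b, c) (by simp); simp at this ⊢; omega
          · exact hc q (List.mem_cons_of_mem _ hq')
        · cases rest with
          | nil => trivial
          | cons q rs =>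
            obtain ⟨hne, ht⟩ := hch
            exact ⟨by simpa [← hb] using hne, ht⟩
    · simp only [pvStepB, if_neg hb]
      constructor
      · intro q hq
        rcases List.mem_cons.1 hq with e | hq'
        · subst e; simp
        · exact hc q hq'
      · exact ⟨fun e => hb e.symm, hch⟩

-- processing four equal moves leaves an invariant stack unchanged
theorem pvStepB_four (st : List (String × Nat)) (a : String) (h : pvInv st) :
    pvStepB (pvStepB (pvStepB (pvStepB st a) a) a) a = st := by
  obtain ⟨hc, hch⟩ := h
  cases st with
  | nil => simp [pvStepB]
  | cons p rest =>
    obtain ⟨b, c⟩ := p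
    have hbc := hc (b, c) (by simp)
    simp at hbc
    obtain ⟨hb1, hb2⟩ := hbc
    by_cases hb : b = a
    · subst hb
      interval_cases c
      · cases rest with
        | nil => simp [pvStepB]
        | cons q rs =>
          obtain ⟨d, e⟩ := q
          have hd : d ≠ b := fun he => hch.1 he.symm
          simp [pvStepB, hd]
      · cases rest with
        | nil => simp [pvStepB]
        | cons q rs =>
          obtain ⟨d, e⟩ := q
          have hd : d ≠ b := fun he => hch.1 he.symm
          simp [pvStepB, hd]
      · cases rest with
        | nil => simp [pvStepB]
        | cons q rs =>
          obtain ⟨d, e⟩ := q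
          have hd : d ≠ b := fun he => hch.1 he.symm
          simp [pvStepB, hd]
    · simp [pvStepB, hb]

-- the stack after a pass equals the stack after the original list
theorem pvFoldl_pass (tmp : List String) :
    ∀ st : List (String × Nat), pvInv st →
      List.foldl pvStepB st (pvPass tmp).1 = List.foldl pvStepB st tmp := by
  fun_induction pvPass tmp with
  | case1 a b c d rest heq ih =>
      intro st hst
      obtain ⟨e1, e2, e3⟩ := heq
      subst e3; subst e2; subst e1
      show List.foldl pvStepB st (pvPass rest).1 = List.foldl pvStepB st (a :: a :: a :: a :: rest)
      rw [ih st hst]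
      show List.foldl pvStepB st rest
         = List.foldl pvStepB (pvStepB (pvStepB (pvStepB (pvStepB st a) a) a) a) rest
      rw [pvStepB_four st a ⟨hst.1, hst.2⟩]
  | case2 a b c d rest heq p ih =>
      intro st hst
      have hp : p = pvPass (b :: c :: d :: rest) := rfl
      show List.foldl pvStepB st (a :: p.1) = List.foldl pvStepB st (a :: b :: c :: d :: rest)
      rw [List.foldl_cons, List.foldl_cons, hp]
      exact ih (pvStepB st a) (pvInv_step st a hst)
  | case3 l hl => intro st hst; rfl

-- if the pass removed nothing, the pass returns its input
theorem pvPass_id (tmp : List String) : (pvPass tmp).2 = false → (pvPass tmp).1 = tmp := by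
  fun_induction pvPass tmp with
  | case1 a b c d rest heq ih => intro h; simp at h
  | case2 a b c d rest heq p ih =>
      intro h
      have hp : p = pvPass (b :: c :: d :: rest) := rfl
      show a :: p.1 = a :: b :: c :: d :: rest
      rw [hp, ih (by simpa [hp] using h)]
  | case3 l hl => intro h; rfl

-- no four equal consecutive elements
def pvNo4 (l : List String) : Prop := ∀ (u : List String) (a : String) (v : List String), l ≠ u ++ a :: a :: a :: a :: v

theorem pvPass_no4 (tmp : List String) : (pvPass tmp).2 = false → pvNo4 tmp := by
  fun_induction pvPass tmp with
  | case1 a b c d rest heq ih => intro h; simp at h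
  | case2 a b c d rest heq p ih =>
      intro h
      have hp : p = pvPass (b :: c :: d :: rest) := rfl
      have ht := ih (by simpa [hp] using h)
      intro u x v he
      cases u with
      | nil =>
        simp at he
        obtain ⟨e1, e2, e3, e4, _⟩ := he
        exact heq ⟨by rw [e1, e2], by rw [e2, e3], by rw [e3, e4]⟩
      | cons y u' =>
        simp at he
        exact ht u' x v he.2
  | case3 l hl =>
      intro _ u x v he
      have hlen : 4 ≤ l.length := by rw [he]; simp; omega
      rcases l with _ | ⟨a, _ | ⟨b, _ | ⟨c, _ | ⟨d, rest⟩⟩⟩⟩ <;> simp at hlen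
      exact hl a b c d rest rfl

theorem pvRender_cons (b : String) (c : Nat) (rest : List (String × Nat)) :
    pvRender ((b, c) :: rest) = pvRender rest ++ List.replicate c b := by
  simp [pvRender]

-- on no-4-run words the stack is a pure run-length encoder, so rendering inverts it
theorem pvRender_foldl_no4 (tmp : List String) (st : List (String × Nat)) (hinv : pvInv st)
    (h : pvNo4 (pvRender st ++ tmp)) :
    pvRender (List.foldl pvStepB st tmp) = pvRender st ++ tmp := by
  induction tmp generalizing st with
  | nil => simp
  | cons a t ih =>
    have hstep : pvRender (pvStepB st a) = pvRender st ++ [a] := by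
      cases st with
      | nil => simp [pvStepB, pvRender]
      | cons p rest =>
        obtain ⟨b, c⟩ := p
        by_cases hb : b = a
        · subst hb
          by_cases h3 : c = 3
          · -- a pop would mean the word has a 4-run: contradiction
            exfalso
            subst h3
            refine h (pvRender rest) b t ?_
            rw [pvRender_cons]
            simp [List.replicate]
          · have hbc := hinv.1 (b, c) (by simp)
            simp at hbc
            rw [show pvStepB ((b, c) :: rest) b = (b, c + 1) :: rest by
                  simp [pvStepB, h3]]
            rw [pvRender_cons, pvRender_cons, List.replicate_succ']
            simp
        · rw [show pvStepB ((b, c) :: rest) a = (a, 1) :: (b, c) :: rest by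
                simp [pvStepB, hb]]
          rw [pvRender_cons (a) 1 ((b, c) :: rest)]
          simp
    have h' : pvNo4 (pvRender (pvStepB st a) ++ t) := by
      rw [hstep]; simpa using h
    have := ih (pvStepB st a) (pvInv_step st a hinv) h'
    simp only [List.foldl_cons] at *
    rw [this, hstep]; simp

-- if the pass removed something, its output is strictly shorter
theorem pvPass_len_le (tmp : List String) : (pvPass tmp).1.length ≤ tmp.length := by
  fun_induction pvPass tmp with
  | case1 a b c d rest heq ih => simp; omega
  | case2 a b c d rest heq p ih =>
      have hp : p = pvPass (b :: c :: d :: rest) := rfl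
      show (a :: p.1).length ≤ (a :: b :: c :: d :: rest).length
      rw [hp]
      simp at ih ⊢
      omega
  | case3 l hl => simp

theorem pvPass_len_lt (tmp : List String) : (pvPass tmp).2 = true →
    (pvPass tmp).1.length < tmp.length := by
  fun_induction pvPass tmp with
  | case1 a b c d rest heq ih =>
      intro _
      have := pvPass_len_le rest
      simp
      omega
  | case2 a b c d rest heq p ih =>
      intro h
      have hp : p = pvPass (b :: c :: d :: rest) := rfl
      have := ih (by simpa [hp] using h)
      show (a :: p.1).length < (a :: b :: c :: d :: rest).length
      rw [hp]
      simp at this ⊢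
      omega
  | case3 l hl => intro h; simp at h

theorem pvAGo_eq (f : Nat) : ∀ (tmp : List String), tmp.length < f →
    pvAGo f tmp = removeFourMovement_py_alt tmp := by
  induction f with
  | zero => intro tmp h; omega
  | succ f IH =>
      intro tmp hf
      rw [pvAGo]
      rw [pvLoopA_eq_pass tmp 0 [] false]
      simp only [List.drop_zero, List.nil_append, Bool.false_or]
      by_cases h2 : (pvPass tmp).2 = true
      · rw [if_pos h2]
        have hlt := pvPass_len_lt tmp h2
        rw [IH (pvPass tmp).1 (by omega)]
        unfold removeFourMovement_py_alt
        rw [pvFoldl_pass tmp [] pvInv_nil]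
      · rw [if_neg h2]
        simp at h2
        rw [pvPass_id tmp h2]
        unfold removeFourMovement_py_alt
        rw [pvRender_foldl_no4 tmp [] pvInv_nil
            (by simpa [pvRender] using pvPass_no4 tmp h2)]
        simp [pvRender]

theorem pvMain (tmp : List String) : removeFourMovement_py tmp = removeFourMovement_py_alt tmp :=
  pvAGo_eq (tmp.length + 1) tmp (Nat.lt_succ_self _)

-- ===== VERDICT (by name: the statement is the Claim_ definition above) =====
theorem removeFourMovement_py_spec : Claim_equal_removeFourMovement_py := by
  intro tmp _
  unfold Spec_removeFourMovement_py
  exact pvMain tmp
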